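-- pv_equiv track=rewrite | github.com/nhatsmrt/AlgorithmPractice | LeetCode/1071. Greatest Common Divisor of Strings/Solution.py | is_repeat
-- ===== SOURCE A (Python) =====
-- def is_repeat(prefix, string):
--     if not prefix:
--         return True
--
--     if len(string) % len(prefix):
--         return False
--
--     for i in range(0, len(string), len(prefix)):
--         if string[i:i + len(prefix)] != prefix:
--             return False
--
--     return True
-- ===== SOURCE B (Python) =====
-- def is_repeat(prefix, string):
--     if not prefix:
--         return True
--     if len(string) % len(prefix):
--         return False
--     return prefix * (len(string) // len(prefix)) == string
-- ===== Notes on version B (the rewrite author's own statement) =====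
-- stated objective: idiomatic
-- what changed: Replaces the explicit per-chunk slicing loop with a single closed-form comparison prefix * (len(string)//len(prefix)) == string.
import Mathlib
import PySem

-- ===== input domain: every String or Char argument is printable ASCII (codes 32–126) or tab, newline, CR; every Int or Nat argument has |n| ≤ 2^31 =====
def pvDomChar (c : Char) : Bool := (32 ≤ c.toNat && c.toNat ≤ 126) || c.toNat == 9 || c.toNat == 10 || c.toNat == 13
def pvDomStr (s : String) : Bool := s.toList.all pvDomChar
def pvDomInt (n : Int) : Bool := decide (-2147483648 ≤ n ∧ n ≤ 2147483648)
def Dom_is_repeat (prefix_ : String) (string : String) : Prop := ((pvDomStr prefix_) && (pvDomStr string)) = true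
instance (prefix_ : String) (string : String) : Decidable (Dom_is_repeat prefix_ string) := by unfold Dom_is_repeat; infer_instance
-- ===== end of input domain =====

-- B replaces A's per-chunk slicing loop by one closed-form comparison prefix * q == string (objective: idiomatic).

-- ===== PORT A =====
-- literal port of A: guard on empty prefix, guard on length remainder, then a loop
-- over range(0, len(string), len(prefix)) comparing each slice with the prefix
-- (the early `return False` makes the loop exactly List.all).
def is_repeat (prefix_ : String) (string : String) : Bool :=
  let p := prefix_.toList
  let s := string.toList
  if p.length = 0 then true
  else if PySem.Int.mod (s.length : Int) (p.length : Int) ≠ 0 then false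
  else
    (PySem.List.pyRange 0 (s.length : Int) (p.length : Int)).all
      (fun i => PySem.List.slice s (some i) (some (i + (p.length : Int))) == p)

-- ===== PORT B =====
-- literal port of Source B: same two guards, then `prefix * (len(string)//len(prefix)) == string`
-- (`*` on a list/string is flatten of replicate; both lengths are Nat so `//`,`%` are Nat / and %).
def is_repeat_alt (prefix_ : String) (string : String) : Bool :=
  let p := prefix_.toList
  let s := string.toList
  if p.length = 0 then true
  else if s.length % p.length ≠ 0 then false
  else (List.replicate (s.length / p.length) p).flatten == s

-- ===== PRECONDITION & SPEC =====
def Spec_is_repeat (prefix_ : String) (string : String) (out : Bool) : Prop := out = is_repeat_alt prefix_ string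
instance (prefix_ : String) (string : String) (out : Bool) : Decidable (Spec_is_repeat prefix_ string out) := by unfold Spec_is_repeat; infer_instance

-- ===== CLAIM (what is proved, stated in full; the proofs are below) =====
def Claim_equal_is_repeat : Prop := ∀ (prefix_ : String) (string : String), Dom_is_repeat prefix_ string → Spec_is_repeat prefix_ string (is_repeat prefix_ string)

-- ===== LEMMAS AND PROOFS =====

-- splitting a list at the length of a prefix
lemma append_eq_iff_take_drop {α : Type} (p X s : List α) (n : Nat) (hp : p.length = n)
    (_ : n ≤ s.length) : (p ++ X = s) ↔ (s.take n = p ∧ X = s.drop n) := by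
  constructor
  · rintro rfl
    constructor
    · rw [← hp]; simp
    · rw [← hp]; simp
  · rintro ⟨h1, h2⟩
    rw [← h1, h2, List.take_append_drop]

-- the chunk loop agrees with the replicate comparison (Prop form)
lemma chunks_iff (p : List Char) (n : Nat) (hp : p.length = n) :
    ∀ (q : Nat) (s : List Char), s.length = q * n →
      ((∀ k < q, (s.drop (n * k)).take n = p) ↔ (List.replicate q p).flatten = s) := by
  intro q
  induction q with
  | zero =>
    intro s hs
    have : s = [] := List.eq_nil_of_length_eq_zero (by omega)
    subst this; simp
  | succ q ih =>
    intro s hs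
    have hle : n ≤ s.length := by simp [hs]; nlinarith
    have hdrop : (s.drop n).length = q * n := by simp [hs]; ring_nf; omega
    have hIH := ih (s.drop n) hdrop
    rw [List.replicate_succ, List.flatten_cons,
        append_eq_iff_take_drop p _ s n hp hle]
    constructor
    · intro h
      refine ⟨by simpa using h 0 (by omega), ?_⟩
      rw [← hIH]
      intro k hk
      rw [List.drop_drop, show n + n * k = n * (k + 1) from by ring]
      exact h (k + 1) (by omega)
    · rintro ⟨h0, h1⟩
      intro k hk
      cases k with
      | zero => simpa using h0
      | succ k =>
        have := (hIH.mpr h1) k (by omega)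
        rw [List.drop_drop] at this
        rwa [show n + n * k = n * (k + 1) from by ring] at this

-- A's range over multiples of n
lemma pyRange_mul (n q : Nat) (hn : 0 < n) :
    PySem.List.pyRange 0 ((q * n : Nat) : Int) (n : Int) =
      (List.range q).map (fun k => ((n * k : Nat) : Int)) := by
  rw [PySem.List.pyRange_of_pos 0 ((q * n : Nat) : Int) (by exact_mod_cast hn)]
  have hcount : (if (0:Int) < ((q * n : Nat) : Int)
      then ((((q * n : Nat) : Int) - 0 + (n : Int) - 1) / (n : Int)).toNat else 0) = q := by
    split_ifs with h
    · have hq : 0 < q := by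
        by_contra hq0
        have : q = 0 := by omega
        simp [this] at h
      have e1 : ((q * n : Nat) : Int) - 0 + (n : Int) - 1 = ((n * q + (n - 1) : Nat) : Int) := by
        push_cast [Nat.cast_sub (by omega : 1 ≤ n)]
        ring
      have hdiv : (n * q + (n - 1)) / n = q := by
        rw [Nat.mul_add_div hn, Nat.div_eq_of_lt (by omega)]
        omega
      rw [e1, ← Int.natCast_div, hdiv, Int.toNat_natCast]
    · have : q = 0 := by
        by_contra hq0
        exact h (by positivity)
      simp [this]
  rw [hcount]
  apply List.map_congr_left
  intro k _
  push_cast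
  ring

-- ===== VERDICT (by name: the statement is the Claim_ definition above) =====
theorem is_repeat_spec : Claim_equal_is_repeat := by
  intro prefix_ string _
  unfold Spec_is_repeat is_repeat is_repeat_alt
  set p := prefix_.toList with hpdef
  set s := string.toList with hsdef
  by_cases hp0 : p.length = 0
  · simp [hp0]
  · have hn : 0 < p.length := Nat.pos_of_ne_zero hp0
    simp only [hp0, if_false]
    have hmod : PySem.Int.mod (s.length : Int) (p.length : Int) =
        ((s.length % p.length : Nat) : Int) := PySem.Int.mod_natCast _ _
    rw [hmod]
    by_cases hdvd : s.length % p.length = 0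
    · rw [if_neg (by simp [hdvd] : ¬ ((s.length % p.length : Nat) : Int) ≠ 0),
          if_neg (by simpa using hdvd)]
      set q := s.length / p.length with hqdef
      have hq : s.length = q * p.length :=
        (Nat.div_mul_cancel (Nat.dvd_of_mod_eq_zero hdvd)).symm
      -- reduce A's loop to the chunk condition
      rw [hq, pyRange_mul p.length q hn, List.all_map]
      have hslice : ∀ k : Nat,
          PySem.List.slice s (some ((p.length * k : Nat) : Int))
            (some (((p.length * k : Nat) : Int) + (p.length : Int))) =
          (s.drop (p.length * k)).take p.length :=
        fun k => PySem.List.slice_natCast_add s (p.length * k) p.length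
      have hchunks := chunks_iff p p.length rfl q s hq
      by_cases hb : (List.replicate q p).flatten = s
      · rw [show ((List.replicate q p).flatten == s) = true from beq_iff_eq.mpr hb,
            List.all_eq_true]
        intro k hk
        have hall := hchunks.mpr hb
        simp only [Function.comp, hslice k]
        exact beq_iff_eq.mpr (hall k (List.mem_range.mp hk))
      · rw [show ((List.replicate q p).flatten == s) = false from beq_eq_false_iff_ne.mpr hb,
            List.all_eq_false]
        have : ¬ ∀ k < q, (s.drop (p.length * k)).take p.length = p := fun hall => hb (hchunks.mp hall)
        push Not at this
        obtain ⟨k, hk, hne⟩ := this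
        refine ⟨k, List.mem_range.mpr hk, ?_⟩
        simp only [Function.comp, hslice k]
        simpa using hne
    · rw [if_pos (by exact_mod_cast hdvd), if_pos hdvd]
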